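-- pv_equiv track=rewrite | github.com/aleksanderpaliszewski/CSP | futoConstraints.py | fileCons
-- ===== SOURCE A (Python) =====
-- def fileCons(matrix, cons, valList, x, y):
--     for element in range(0, len(cons)):
--         if cons[element] == str(x) + str(y):
--             if element % 2 == 0:
--                 conX = int(cons[element + 1][0])
--                 conY = int(cons[element + 1][1])
--                 secondValue = matrix[conX][conY]
--                 if secondValue > 0:
--                     valList = takeSmaller(valList, secondValue)
--             else:
--                 conX = int(cons[element - 1][0])
--                 conY = int(cons[element - 1][1])
--                 secondValue = matrix[conX][conY]
--                 if secondValue > 0: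
--                     valList = takeBigger(valList, secondValue)
--     return valList
--
-- def takeSmaller(valList, value):
--     smallerValues = []
--     for element in valList:
--         if element < value:
--             smallerValues.append(element)
--     return smallerValues
--
-- def takeBigger(valList, value):
--     biggerValues = []
--     for element in valList:
--         if element > value:
--             biggerValues.append(element)
--     return biggerValues
-- ===== SOURCE B (Python) =====
-- def fileCons(matrix, cons, valList, x, y):
--     # One bound-building scan over cons, then a single filtering pass over valList.
--     lower = None
--     upper = None
--     key = str(x) + str(y)
--     for element in range(0, len(cons)):
--         if cons[element] == key:
--             if element % 2 == 0:
--                 conX = int(cons[element + 1][0])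
--                 conY = int(cons[element + 1][1])
--                 secondValue = matrix[conX][conY]
--                 if secondValue > 0:
--                     upper = secondValue if upper is None else min(upper, secondValue)
--             else:
--                 conX = int(cons[element - 1][0])
--                 conY = int(cons[element - 1][1])
--                 secondValue = matrix[conX][conY]
--                 if secondValue > 0:
--                     lower = secondValue if lower is None else max(lower, secondValue)
--     return [v for v in valList
--             if (lower is None or v > lower) and (upper is None or v < upper)]
-- ===== Notes on version B (the rewrite author's own statement) =====
-- stated objective: alternative
-- what changed: Instead of re-filtering valList once per matched constraint (takeSmaller/takeBigger passes), B scans cons once accumulating a single strict lower and upper bound (max of lower bounds, min of upper bounds) and then filters valList in one final pass.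
import Mathlib
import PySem

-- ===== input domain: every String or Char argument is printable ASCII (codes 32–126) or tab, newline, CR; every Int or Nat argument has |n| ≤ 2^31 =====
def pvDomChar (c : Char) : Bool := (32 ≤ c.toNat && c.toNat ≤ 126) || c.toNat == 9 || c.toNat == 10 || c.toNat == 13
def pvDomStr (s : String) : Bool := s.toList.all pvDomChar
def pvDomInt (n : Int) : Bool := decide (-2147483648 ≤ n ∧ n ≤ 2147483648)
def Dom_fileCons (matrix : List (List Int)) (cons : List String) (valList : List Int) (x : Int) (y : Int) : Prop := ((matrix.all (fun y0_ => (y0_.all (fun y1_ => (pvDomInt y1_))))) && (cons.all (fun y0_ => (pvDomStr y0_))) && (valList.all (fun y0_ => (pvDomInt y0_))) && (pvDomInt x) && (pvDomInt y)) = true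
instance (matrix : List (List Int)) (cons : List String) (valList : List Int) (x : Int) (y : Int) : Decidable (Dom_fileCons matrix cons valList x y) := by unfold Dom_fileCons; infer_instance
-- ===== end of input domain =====

-- B replaces A's repeated filtering passes (one per matched constraint) by one bound-accumulating
-- scan over cons followed by a single filtering pass over valList; same return value on Pre_.

-- ===== PORT A =====
-- str(x) + str(y), as a character list
def pvKey (x y : Int) : List Char := PySem.Int.toChars x ++ PySem.Int.toChars y

-- the index chain conX = int(cons[j][0]); conY = int(cons[j][1]); matrix[conX][conY]
-- (shared verbatim by both Pythons; none = the Python raises there)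
def pvSecond (matrix : List (List Int)) (cons : List String) (j : Int) : Option Int :=
  match PySem.List.pyGet? cons j with
  | none => none
  | some s =>
    match PySem.Str.pyGet? s 0, PySem.Str.pyGet? s 1 with
    | some c0, some c1 =>
      match PySem.Int.ofChars? [c0], PySem.Int.ofChars? [c1] with
      | some conX, some conY =>
        match PySem.List.pyGet? matrix conX with
        | none => none
        | some row => PySem.List.pyGet? row conY
      | _, _ => none
    | _, _ => none

def pvTakeSmaller (valList : List Int) (value : Int) : List Int :=
  valList.foldl (fun acc e => if e < value then acc ++ [e] else acc) []

def pvTakeBigger (valList : List Int) (value : Int) : List Int :=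
  valList.foldl (fun acc e => if e > value then acc ++ [e] else acc) []

-- the body of A's for-loop, one iteration
def pvStepA (matrix : List (List Int)) (cons : List String) (key : List Char)
    (vl : List Int) (e : Int) : List Int :=
  match PySem.List.pyGet? cons e with
  | none => vl
  | some s =>
    if s.toList = key then
      if PySem.Int.mod e 2 = 0 then
        match pvSecond matrix cons (e + 1) with
        | some sv => if sv > 0 then pvTakeSmaller vl sv else vl
        | none => vl
      else
        match pvSecond matrix cons (e - 1) with
        | some sv => if sv > 0 then pvTakeBigger vl sv else vl
        | none => vl
    else vl

def fileCons (matrix : List (List Int)) (cons : List String) (valList : List Int) (x : Int) (y : Int) : List Int :=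
  (PySem.List.pyRange 0 (cons.length : Int) 1).foldl (pvStepA matrix cons (pvKey x y)) valList

-- ===== PORT B =====
-- the body of B's bound-building loop: state = (lower, upper)
def pvStepB (matrix : List (List Int)) (cons : List String) (key : List Char)
    (b : Option Int × Option Int) (e : Int) : Option Int × Option Int :=
  match PySem.List.pyGet? cons e with
  | none => b
  | some s =>
    if s.toList = key then
      if PySem.Int.mod e 2 = 0 then
        match pvSecond matrix cons (e + 1) with
        | some sv =>
          if sv > 0 then
            (b.1, some (match b.2 with | none => sv | some h => min h sv))
          else b
        | none => b
      else
        match pvSecond matrix cons (e - 1) with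
        | some sv =>
          if sv > 0 then
            (some (match b.1 with | none => sv | some l => max l sv), b.2)
          else b
        | none => b
    else b

-- B's final comprehension test
def pvKeep (b : Option Int × Option Int) (v : Int) : Bool :=
  (match b.1 with | none => true | some l => decide (l < v)) &&
  (match b.2 with | none => true | some h => decide (v < h))

def fileCons_alt (matrix : List (List Int)) (cons : List String) (valList : List Int) (x : Int) (y : Int) : List Int :=
  let bounds := (PySem.List.pyRange 0 (cons.length : Int) 1).foldl
    (pvStepB matrix cons (pvKey x y)) (none, none)
  valList.filter (pvKeep bounds)

-- ===== PRECONDITION & SPEC =====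
-- Pre_ excludes exactly the inputs on which the Python raises: some matched constraint whose
-- partner entry is missing, shorter than two characters, non-digit, or indexes outside matrix.
def Pre_fileCons (matrix : List (List Int)) (cons : List String) (valList : List Int) (x : Int) (y : Int) : Prop :=
  ∀ i : Nat, i < cons.length → (cons.getD i "").toList = pvKey x y →
    (let j : Nat := if i % 2 = 0 then i + 1 else i - 1
     j < cons.length ∧
     (let cs := (cons.getD j "").toList
      2 ≤ cs.length ∧ (cs.getD 0 ' ').isDigit ∧ (cs.getD 1 ' ').isDigit ∧
      ((cs.getD 0 ' ').toNat - 48) < matrix.length ∧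
      ((cs.getD 1 ' ').toNat - 48) < (matrix.getD ((cs.getD 0 ' ').toNat - 48) []).length))

instance (matrix : List (List Int)) (cons : List String) (valList : List Int) (x : Int) (y : Int) : Decidable (Pre_fileCons matrix cons valList x y) := by unfold Pre_fileCons; infer_instance

def pvWitness_fileCons : List (List Int) × List String × List Int × Int × Int :=
  ([[0, 3], [2, 0]], ["01", "10", "10", "01"], [1, 2, 3, 4], 0, 1)

def Spec_fileCons (matrix : List (List Int)) (cons : List String) (valList : List Int) (x : Int) (y : Int) (out : List Int) : Prop := out = fileCons_alt matrix cons valList x y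
instance (matrix : List (List Int)) (cons : List String) (valList : List Int) (x : Int) (y : Int) (out : List Int) : Decidable (Spec_fileCons matrix cons valList x y out) := by unfold Spec_fileCons; infer_instance

-- ===== CLAIM (what is proved, stated in full; the proofs are below) =====
def Claim_equal_fileCons : Prop := ∀ (matrix : List (List Int)) (cons : List String) (valList : List Int) (x : Int) (y : Int), Dom_fileCons matrix cons valList x y → Pre_fileCons matrix cons valList x y → Spec_fileCons matrix cons valList x y (fileCons matrix cons valList x y)

-- ===== LEMMAS AND PROOFS =====

lemma pvTakeSmaller_eq_filter (vl : List Int) (v : Int) :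
    pvTakeSmaller vl v = vl.filter (fun e => decide (e < v)) := by
  simpa [pvTakeSmaller] using
    PySem.List.foldl_append_if_eq_filter (fun e => decide (e < v)) vl []

lemma pvTakeBigger_eq_filter (vl : List Int) (v : Int) :
    pvTakeBigger vl v = vl.filter (fun e => decide (e > v)) := by
  simpa [pvTakeBigger] using
    PySem.List.foldl_append_if_eq_filter (fun e => decide (e > v)) vl []

lemma pvKeep_upper (b : Option Int × Option Int) (sv v : Int) :
    pvKeep (b.1, some (match b.2 with | none => sv | some h => min h sv)) v
      = (decide (v < sv) && pvKeep b v) := by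
  rcases b with ⟨l, h⟩
  rcases h with _ | h <;> rcases l with _ | l <;>
    simp [pvKeep, Bool.and_comm, Bool.and_assoc]

lemma pvKeep_lower (b : Option Int × Option Int) (sv v : Int) :
    pvKeep (some (match b.1 with | none => sv | some l => max l sv), b.2) v
      = (decide (v > sv) && pvKeep b v) := by
  rcases b with ⟨l, h⟩
  rcases l with _ | l <;> rcases h with _ | h <;>
    simp [pvKeep, Bool.and_comm, Bool.and_left_comm]

lemma stepA_filter (matrix : List (List Int)) (cons : List String) (key : List Char)
    (L : List Int) (b : Option Int × Option Int) (e : Int) :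
    pvStepA matrix cons key (L.filter (pvKeep b)) e
      = L.filter (pvKeep (pvStepB matrix cons key b e)) := by
  unfold pvStepA pvStepB
  cases hs : PySem.List.pyGet? cons e with
  | none => rfl
  | some s =>
    by_cases hk : s.toList = key
    · simp only [hk, if_true]
      by_cases hm : PySem.Int.mod e 2 = 0
      · simp only [hm, if_true]
        cases hsv : pvSecond matrix cons (e + 1) with
        | none => rfl
        | some sv =>
          by_cases hp : sv > 0
          · simp only [hp, if_true, pvTakeSmaller_eq_filter, List.filter_filter]
            exact List.filter_congr (fun v _ => (pvKeep_upper b sv v).symm)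
          · simp [hp]
      · simp only [hm, if_false]
        cases hsv : pvSecond matrix cons (e - 1) with
        | none => rfl
        | some sv =>
          by_cases hp : sv > 0
          · simp only [hp, if_true, pvTakeBigger_eq_filter, List.filter_filter]
            exact List.filter_congr (fun v _ => (pvKeep_lower b sv v).symm)
          · simp [hp]
    · simp [hk]

lemma foldl_filter (matrix : List (List Int)) (cons : List String) (key : List Char)
    (L : List Int) :
    ∀ (es : List Int) (b : Option Int × Option Int),
      es.foldl (pvStepA matrix cons key) (L.filter (pvKeep b))
        = L.filter (pvKeep (es.foldl (pvStepB matrix cons key) b)) := by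
  intro es
  induction es with
  | nil => intro b; rfl
  | cons e es ih =>
    intro b
    simp only [List.foldl_cons, stepA_filter]
    exact ih _

-- ===== VERDICT (by name: the statement is the Claim_ definition above) =====
theorem fileCons_spec : Claim_equal_fileCons := by
  intro matrix cons valList x y _ _
  unfold Spec_fileCons fileCons fileCons_alt
  have h0 : valList.filter (pvKeep (none, none)) = valList :=
    List.filter_eq_self.mpr (fun a _ => by simp [pvKeep])
  have main := foldl_filter matrix cons (pvKey x y) valList
    (PySem.List.pyRange 0 (cons.length : Int) 1) (none, none)
  rw [h0] at main
  exact main
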